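-- pv_equiv track=rewrite | github.com/Julien-pour/arc_example | 32b_gen3-4/ex4/b8cdaf2b/task.py | transform
-- ===== SOURCE A (Python) =====
-- def transform(grid):
--
--     def fill_outer_diagonals(grid, target_value, fill_value):
--         n = len(grid)
--         m = len(grid[0])
--         top_row = next((i for i in range(n) if target_value in grid[i]), None)
--         bottom_row = next((i for i in range(n - 1, -1, -1) if target_value in grid[i]), None)
--         if top_row is None or bottom_row is None:
--             return
--         top_col = grid[top_row].index(target_value)
--         bottom_col = grid[bottom_row].index(target_value)
--         right_col = next((j for j in range(m - 1, -1, -1) if grid[top_row][j] == target_value), None)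
--         left_col = next((j for j in range(m) if grid[top_row][j] == target_value), None)
--         if right_col is None or left_col is None:
--             return
--         for i in range(top_row):
--             j = left_col - (top_row - i)
--             if 0 <= j < m and grid[i][j] == 0:
--                 grid[i][j] = fill_value
--             j = right_col + (top_row - i)
--             if 0 <= j < m and grid[i][j] == 0:
--                 grid[i][j] = fill_value
--         for i in range(bottom_row + 1, n):
--             j = left_col - (i - bottom_row)
--             if 0 <= j < m and grid[i][j] == 0:
--                 grid[i][j] = fill_value
--             j = right_col + (i - bottom_row)
--             if 0 <= j < m and grid[i][j] == 0:
--                 grid[i][j] = fill_value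
--     target_to_fill = {2: 4, 6: 1, 8: 3}
--     for target_value, fill_value in target_to_fill.items():
--         fill_outer_diagonals(grid, target_value, fill_value)
--     return grid
-- ===== SOURCE B (Python) =====
-- def transform(grid):
--     # Rebuild the grid per target with a per-cell "outer diagonal ray" predicate,
--     # instead of mutating via two row-range loops.
--     for target, fill in ((2, 4), (6, 1), (8, 3)):
--         rows = [i for i, row in enumerate(grid) if target in row]
--         if not rows:
--             continue
--         top, bottom = rows[0], rows[-1]
--         cols = [j for j, x in enumerate(grid[top]) if x == target]
--         if not cols:
--             continue
--         left, right = cols[0], cols[-1]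
--
--         def on_ray(i, j):
--             if i < top:
--                 d = top - i
--             elif i > bottom:
--                 d = i - bottom
--             else:
--                 return False
--             return j == left - d or j == right + d
--
--         grid[:] = [[fill if x == 0 and on_ray(i, j) else x
--                     for j, x in enumerate(row)]
--                    for i, row in enumerate(grid)]
--     return grid
-- ===== Notes on version B (the rewrite author's own statement) =====
-- stated objective: alternative
-- what changed: Instead of mutating the grid in place with two row-index loops computing diagonal offsets, B finds the marker rows/cols by list comprehensions and rebuilds the whole grid in one pass with a per-cell 'on outer diagonal ray' predicate; the dead top_col/bottom_col computations and always-false None guards are dropped.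
-- outside the precondition, e.g. on transform([[2], [0, 0]]): A returns [[2], [0, 0]], B returns [[2], [0, 4]]; on transform([]): A raises IndexError, B returns []
import Mathlib
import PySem

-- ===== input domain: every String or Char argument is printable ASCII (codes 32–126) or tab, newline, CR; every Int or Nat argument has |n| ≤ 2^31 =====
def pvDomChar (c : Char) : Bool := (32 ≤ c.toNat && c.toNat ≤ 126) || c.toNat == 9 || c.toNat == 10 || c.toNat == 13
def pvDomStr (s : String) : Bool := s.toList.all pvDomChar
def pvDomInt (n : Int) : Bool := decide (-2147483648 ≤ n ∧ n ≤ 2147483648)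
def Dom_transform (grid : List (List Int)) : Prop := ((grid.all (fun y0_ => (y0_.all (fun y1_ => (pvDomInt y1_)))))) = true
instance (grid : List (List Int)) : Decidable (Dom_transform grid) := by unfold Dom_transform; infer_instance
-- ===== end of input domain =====

-- B rebuilds the grid with a per-cell ray predicate instead of A's in-place index loops;
-- equivalence is about the RETURN value (A mutates its argument in place, B rebinds grid[:]).

-- ===== PORT A =====
-- grid[i][j] = fill_value guarded by 0 <= j < m and grid[i][j] == 0 (indices in range on Pre_)
def pvCondSetA (m : Nat) (v : Int) (g : List (List Int)) (i : Nat) (j : Int) : List (List Int) :=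
  if 0 ≤ j ∧ j < (m : Int) then
    if (g.getD i []).getD j.toNat 0 == 0 then g.set i ((g.getD i []).set j.toNat v) else g
  else g

def pvFillA (g : List (List Int)) (t v : Int) : List (List Int) :=
  let n := g.length
  let m := (g.getD 0 []).length
  match (List.range n).find? (fun i => (g.getD i []).contains t) with
  | none => g
  | some topRow =>
    match (List.range n).reverse.find? (fun i => (g.getD i []).contains t) with
    | none => g
    | some bottomRow =>
      let _topCol := PySem.List.index? (g.getD topRow []) t
      let _bottomCol := PySem.List.index? (g.getD bottomRow []) t
      match (List.range m).reverse.find? (fun j => (g.getD topRow []).getD j 0 == t) with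
      | none => g
      | some rightCol =>
        match (List.range m).find? (fun j => (g.getD topRow []).getD j 0 == t) with
        | none => g
        | some leftCol =>
          let g1 := (List.range topRow).foldl (fun g i =>
            let g := pvCondSetA m v g i ((leftCol : Int) - ((topRow : Int) - (i : Int)))
            pvCondSetA m v g i ((rightCol : Int) + ((topRow : Int) - (i : Int)))) g
          (List.range' (bottomRow + 1) (n - (bottomRow + 1))).foldl (fun g i =>
            let g := pvCondSetA m v g i ((leftCol : Int) - ((i : Int) - (bottomRow : Int)))
            pvCondSetA m v g i ((rightCol : Int) + ((i : Int) - (bottomRow : Int)))) g1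

def transform (grid : List (List Int)) : List (List Int) :=
  [((2 : Int), (4 : Int)), (6, 1), (8, 3)].foldl (fun g p => pvFillA g p.1 p.2) grid

-- ===== PORT B =====
def pvOnRay (top bottom left right : Int) (i j : Int) : Bool :=
  if i < top then (j == left - (top - i)) || (j == right + (top - i))
  else if bottom < i then (j == left - (i - bottom)) || (j == right + (i - bottom))
  else false

def pvFillB (g : List (List Int)) (t v : Int) : List (List Int) :=
  let rows := ((PySem.List.enumerate g).filter (fun p => p.2.contains t)).map Prod.fst
  match rows with
  | [] => g
  | top :: rest =>
    let bottom := (top :: rest).getLast (List.cons_ne_nil _ _)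
    let cols := ((PySem.List.enumerate (PySem.List.pyGetD g top [])).filter (fun p => p.2 == t)).map Prod.fst
    match cols with
    | [] => g
    | left :: rest2 =>
      let right := (left :: rest2).getLast (List.cons_ne_nil _ _)
      (PySem.List.enumerate g).map (fun p =>
        (PySem.List.enumerate p.2).map (fun q =>
          if q.2 == 0 && pvOnRay top bottom left right p.1 q.1 then v else q.2))

def transform_alt (grid : List (List Int)) : List (List Int) :=
  [((2 : Int), (4 : Int)), (6, 1), (8, 3)].foldl (fun g p => pvFillB g p.1 p.2) grid

-- ===== PRECONDITION & SPEC =====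
-- Pre_ admits nonempty grids that are RECTANGULAR (the natural domain of this ARC grid task)
-- or contain NO marker value 2/6/8 (where the function is the identity): A raises IndexError
-- on [] and on some ragged grids containing a marker, and on the other ragged grids with a
-- marker its use of len(grid[0]) as every row's width is accidental (cite in claim.json).
def Pre_transform (grid : List (List Int)) : Prop :=
  grid ≠ [] ∧
    ((∀ row ∈ grid, ¬(2 : Int) ∈ row ∧ ¬(6 : Int) ∈ row ∧ ¬(8 : Int) ∈ row) ∨
      ∀ row ∈ grid, row.length = (grid.headD []).length)
instance (grid : List (List Int)) : Decidable (Pre_transform grid) := by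
  unfold Pre_transform; infer_instance

def pvWitness_transform : List (List Int) := [[2, 0, 2], [0, 0, 0], [0, 0, 0]]

def Spec_transform (grid : List (List Int)) (out : List (List Int)) : Prop := out = transform_alt grid
instance (grid : List (List Int)) (out : List (List Int)) : Decidable (Spec_transform grid out) := by unfold Spec_transform; infer_instance

-- ===== CLAIM (what is proved, stated in full; the proofs are below) =====
def Claim_equal_transform : Prop := ∀ (grid : List (List Int)), Dom_transform grid → Pre_transform grid → Spec_transform grid (transform grid)

-- ===== LEMMAS AND PROOFS =====

def pvRect (g : List (List Int)) (n m : Nat) : Prop :=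
  g.length = n ∧ ∀ row ∈ g, row.length = m

def pvCell (g : List (List Int)) (i j : Nat) : Int := (g.getD i []).getD j 0

abbrev pvHit (n m : Nat) (p : Nat × Int) (i j : Nat) : Prop :=
  p.1 = i ∧ p.1 < n ∧ 0 ≤ p.2 ∧ p.2 < (m : Int) ∧ p.2.toNat = j

theorem pv_rect_condSet {g : List (List Int)} {n m : Nat} (hg : pvRect g n m)
    (v : Int) (a : Nat) (b : Int) : pvRect (pvCondSetA m v g a b) n m := by
  obtain ⟨hlen, hrow⟩ := hg
  unfold pvCondSetA
  split_ifs with h1 h2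
  · by_cases ha : a < g.length
    · refine ⟨by simpa using hlen, ?_⟩
      intro row hmem
      rcases List.mem_or_eq_of_mem_set hmem with h | h
      · exact hrow row h
      · subst h
        rw [List.getD_eq_getElem?_getD, List.getElem?_eq_getElem ha]
        simp only [Option.getD_some, List.length_set]
        exact hrow _ (List.getElem_mem ha)
    · rw [List.set_eq_of_length_le (by omega)]; exact ⟨hlen, hrow⟩
  · exact ⟨hlen, hrow⟩
  · exact ⟨hlen, hrow⟩

theorem pv_cell_condSet {g : List (List Int)} {n m : Nat} (hg : pvRect g n m)
    (v : Int) (p : Nat × Int) (i j : Nat) :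
    pvCell (pvCondSetA m v g p.1 p.2) i j =
      if pvHit n m p i j ∧ pvCell g i j = 0 then v else pvCell g i j := by
  obtain ⟨hlen, hrow⟩ := hg
  obtain ⟨a, b⟩ := p
  unfold pvCondSetA pvCell pvHit
  simp only
  by_cases h1 : 0 ≤ b ∧ b < (m : Int)
  · rw [if_pos h1]
    by_cases h2 : ((g.getD a []).getD b.toNat 0 == 0) = true
    · rw [if_pos h2]
      by_cases h3 : (a = i ∧ a < n ∧ 0 ≤ b ∧ b < (m : Int) ∧ b.toNat = j) ∧
          (g.getD i []).getD j 0 = 0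
      · rw [if_pos h3]
        obtain ⟨⟨rfl, han, hb0, hbm, rfl⟩, hcz⟩ := h3
        have ha : a < g.length := by omega
        have hga : g.getD a [] = g[a] := by
          rw [List.getD_eq_getElem?_getD, List.getElem?_eq_getElem ha]; rfl
        have hblt : b.toNat < (g[a]).length := by
          rw [hrow _ (List.getElem_mem ha)]; omega
        rw [List.getD_eq_getElem?_getD (a := ([] : List Int)), List.getElem?_set_self ha]
        simp only [Option.getD_some, hga]
        rw [List.getD_eq_getElem?_getD, List.getElem?_set_self hblt]
        rfl
      · rw [if_neg h3]
        by_cases ha : a < g.length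
        · by_cases hia : i = a
          · subst hia
            have hga : g.getD i [] = g[i] := by
              rw [List.getD_eq_getElem?_getD, List.getElem?_eq_getElem ha]; rfl
            by_cases hjb : j = b.toNat
            · exfalso
              apply h3
              subst hjb
              refine ⟨⟨rfl, by omega, h1.1, h1.2, rfl⟩, ?_⟩
              simpa using h2
            · rw [List.getD_eq_getElem?_getD (a := ([] : List Int)),
                  List.getElem?_set_self ha]
              simp only [Option.getD_some, hga]
              rw [List.getD_eq_getElem?_getD, List.getElem?_set_ne (by omega),
                  ← List.getD_eq_getElem?_getD]
          · rw [List.getD_eq_getElem?_getD (a := ([] : List Int)),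
                List.getElem?_set_ne (by omega), ← List.getD_eq_getElem?_getD]
        · rw [List.set_eq_of_length_le (by omega)]
    · rw [if_neg h2, if_neg]
      rintro ⟨⟨rfl, han, hb0, hbm, rfl⟩, hcz⟩
      exact h2 (by simpa using hcz)
  · rw [if_neg h1, if_neg]
    rintro ⟨⟨rfl, han, hb0, hbm, rfl⟩, hcz⟩
    exact h1 ⟨hb0, hbm⟩

theorem pv_rect_foldl {n m : Nat} (v : Int) (ps : List (Nat × Int)) :
    ∀ (g : List (List Int)), pvRect g n m →
      pvRect (ps.foldl (fun g p => pvCondSetA m v g p.1 p.2) g) n m := by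
  induction ps with
  | nil => intro g hg; exact hg
  | cons p ps ih => intro g hg; exact ih _ (pv_rect_condSet hg v p.1 p.2)

theorem pv_cell_foldl {n m : Nat} {v : Int} (hv : v ≠ 0) (ps : List (Nat × Int)) :
    ∀ (g : List (List Int)), pvRect g n m → ∀ (i j : Nat),
      pvCell (ps.foldl (fun g p => pvCondSetA m v g p.1 p.2) g) i j =
        if (∃ p ∈ ps, pvHit n m p i j) ∧ pvCell g i j = 0 then v else pvCell g i j := by
  induction ps with
  | nil => intro g hg i j; simp
  | cons p ps ih =>
    intro g hg i j
    rw [List.foldl_cons, ih _ (pv_rect_condSet hg v p.1 p.2) i j,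
        pv_cell_condSet hg v p i j]
    by_cases hc : pvHit n m p i j ∧ pvCell g i j = 0
    · rw [if_pos hc, if_neg (fun h => hv h.2),
          if_pos ⟨⟨p, List.mem_cons_self, hc.1⟩, hc.2⟩]
    · rw [if_neg hc]
      by_cases hz : pvCell g i j = 0
      · have hnp : ¬ pvHit n m p i j := fun h => hc ⟨h, hz⟩
        have : (∃ q ∈ p :: ps, pvHit n m q i j) ↔ (∃ q ∈ ps, pvHit n m q i j) := by
          constructor
          · rintro ⟨q, hq, hqh⟩
            rcases List.mem_cons.1 hq with rfl | hq'
            · exact absurd hqh hnp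
            · exact ⟨q, hq', hqh⟩
          · rintro ⟨q, hq, hqh⟩; exact ⟨q, List.mem_cons_of_mem _ hq, hqh⟩
        rw [if_congr (and_congr_left' this) rfl rfl]
      · rw [if_neg (fun h => hz h.2), if_neg (fun h => hz h.2)]

theorem pv_foldl_pair {m : Nat} {v : Int} (l : List Nat) (f1 f2 : Nat → Int) :
    ∀ (g : List (List Int)),
      l.foldl (fun g i => pvCondSetA m v (pvCondSetA m v g i (f1 i)) i (f2 i)) g
      = (l.flatMap (fun i => [((i : Nat), f1 i), (i, f2 i)])).foldl
          (fun g p => pvCondSetA m v g p.1 p.2) g := by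
  induction l with
  | nil => intro g; rfl
  | cons a l ih => intro g; simp only [List.foldl_cons, List.flatMap_cons, List.foldl_append, ih]; rfl

theorem pv_find?_eq_head?_filter {α : Type} (l : List α) (p : α → Bool) :
    l.find? p = (l.filter p).head? := by
  induction l with
  | nil => rfl
  | cons a l ih =>
    rw [List.find?_cons, List.filter_cons]
    cases h : p a
    · simpa using ih
    · simpa using ih

theorem pv_find?_reverse_eq_getLast?_filter {α : Type} (l : List α) (p : α → Bool) :
    l.reverse.find? p = (l.filter p).getLast? := by
  rw [pv_find?_eq_head?_filter, List.filter_reverse, List.head?_reverse]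

theorem pv_enum_filter {α : Type} [Inhabited α] (l : List α) (q : α → Bool) :
    ∀ (s : Nat),
      ((PySem.List.enumerate l (s : Int)).filter (fun p => q p.2)).map Prod.fst
      = ((List.range l.length).filter (fun k => q (l.getD k default))).map
          (fun k => (((k + s : Nat)) : Int)) := by
  induction l with
  | nil => intro s; rfl
  | cons a l ih =>
    intro s
    rw [show (PySem.List.enumerate (a :: l) (s : Int))
          = ((s : Int), a) :: PySem.List.enumerate l ((s : Int) + 1) from
        PySem.List.enumerate_cons .., List.filter_cons]
    rw [List.length_cons, List.range_succ_eq_map, List.filter_cons]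
    have hc : ((s : Int) + 1) = (((s + 1 : Nat)) : Int) := by omega
    cases hqa : q a
    · simp only [List.getD_cons_zero, hqa, Bool.false_eq_true, if_false, hc, ih (s + 1),
        List.filter_map, List.map_map, Function.comp_def, List.getD_cons_succ]
      congr 1
      funext k
      omega
    · simp only [List.getD_cons_zero, hqa, if_true, List.map_cons, hc, ih (s + 1),
        List.filter_map, List.map_map, Function.comp_def, List.getD_cons_succ]
      congr 1
      · omega
      · congr 1
        funext k
        omega

theorem pv_rows_eq (g : List (List Int)) (t : Int) :
    ((PySem.List.enumerate g).filter (fun p => p.2.contains t)).map Prod.fst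
      = ((List.range g.length).filter (fun k => (g.getD k []).contains t)).map
          (fun (k : Nat) => (k : Int)) := by
  simpa only [Nat.add_zero] using pv_enum_filter g (fun row => row.contains t) 0

theorem pv_cols_eq (row : List Int) (t : Int) :
    ((PySem.List.enumerate row).filter (fun p => p.2 == t)).map Prod.fst
      = ((List.range row.length).filter (fun k => row.getD k 0 == t)).map
          (fun (k : Nat) => (k : Int)) := by
  simpa only [Nat.add_zero] using pv_enum_filter row (fun x => x == t) 0

theorem pv_cell_eq {g : List (List Int)} {i j : Nat} (hi : i < g.length)
    (hj : j < (g[i]'hi).length) : pvCell g i j = (g[i]'hi)[j]'hj := by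
  unfold pvCell
  rw [List.getD_eq_getElem?_getD (l := g), List.getElem?_eq_getElem hi, Option.getD_some,
      List.getD_eq_getElem?_getD, List.getElem?_eq_getElem hj, Option.getD_some]

theorem pv_grid_ext {g h : List (List Int)} {n m : Nat} (hg : pvRect g n m)
    (hh : pvRect h n m)
    (hc : ∀ i j, i < n → j < m → pvCell g i j = pvCell h i j) : g = h := by
  have hgl := hg.1
  have hhl := hh.1
  apply List.ext_getElem (by omega)
  intro i h1 h2
  have hrg : (g[i]'h1).length = m := hg.2 _ (List.getElem_mem h1)
  have hrh : (h[i]'h2).length = m := hh.2 _ (List.getElem_mem h2)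
  apply List.ext_getElem (by omega)
  intro j hj1 hj2
  have hcc := hc i j (by omega) (by omega)
  rw [pv_cell_eq h1 hj1, pv_cell_eq h2 hj2] at hcc
  exact hcc

theorem pv_rect_mapB {g : List (List Int)} {n m : Nat} (hg : pvRect g n m)
    (T B L R v : Int) :
    pvRect ((PySem.List.enumerate g).map (fun p =>
        (PySem.List.enumerate p.2).map (fun q =>
          if q.2 == 0 && pvOnRay T B L R p.1 q.1 then v else q.2))) n m := by
  constructor
  · simp [PySem.List.length_enumerate, hg.1]
  · intro row hrow
    simp only [List.mem_map] at hrow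
    obtain ⟨p, hp, rfl⟩ := hrow
    simp only [List.length_map, PySem.List.length_enumerate]
    rcases (PySem.List.mem_enumerate_iff _ _ _).1 hp with ⟨k, hk, rfl⟩
    exact hg.2 _ (List.getElem_mem hk)

theorem pv_cell_mapB {g : List (List Int)} {n m : Nat} (hg : pvRect g n m)
    (T B L R v : Int) (i j : Nat) (hi : i < n) (hj : j < m) :
    pvCell ((PySem.List.enumerate g).map (fun p =>
        (PySem.List.enumerate p.2).map (fun q =>
          if q.2 == 0 && pvOnRay T B L R p.1 q.1 then v else q.2))) i j
      = if pvCell g i j == 0 && pvOnRay T B L R (i : Int) (j : Int) then v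
        else pvCell g i j := by
  have hn := hg.1
  have hi' : i < g.length := by omega
  have hj' : j < (g[i]'hi').length := by
    rw [hg.2 _ (List.getElem_mem hi')]; exact hj
  have hi2 : i < ((PySem.List.enumerate g).map (fun p =>
      (PySem.List.enumerate p.2).map (fun q =>
        if q.2 == 0 && pvOnRay T B L R p.1 q.1 then v else q.2))).length := by
    simp [PySem.List.length_enumerate]; omega
  rw [pv_cell_eq hi2 (by simp [List.getElem_map, PySem.List.getElem_enumerate,
    PySem.List.length_enumerate, hj'])]
  simp only [List.getElem_map, PySem.List.getElem_enumerate]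
  rw [pv_cell_eq hi' hj']
  norm_num

theorem pv_hit_iff (n m top bottom left right i j : Nat)
    (hbn : bottom < n) (htb : top ≤ bottom) (hi : i < n) (hj : j < m) :
    (∃ p ∈ (List.range top).flatMap (fun i' =>
        [((i' : Nat), (left : Int) - ((top : Int) - (i' : Int))),
         (i', (right : Int) + ((top : Int) - (i' : Int)))]) ++
      (List.range' (bottom + 1) (n - (bottom + 1))).flatMap (fun i' =>
        [((i' : Nat), (left : Int) - ((i' : Int) - (bottom : Int))),
         (i', (right : Int) + ((i' : Int) - (bottom : Int)))]),
      pvHit n m p i j)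
    ↔ pvOnRay (top : Int) (bottom : Int) (left : Int) (right : Int) (i : Int) (j : Int)
        = true := by
  unfold pvOnRay pvHit
  constructor
  · rintro ⟨⟨a, b⟩, hp, rfl, hpn, hb0, hbm, rfl⟩
    rcases List.mem_append.1 hp with hp | hp <;>
      · simp only [List.mem_flatMap, List.mem_range, List.mem_range', List.mem_cons,
          List.not_mem_nil, or_false, Prod.mk.injEq] at hp
        obtain ⟨i', hi', ⟨rfl, rfl⟩ | ⟨rfl, rfl⟩⟩ := hp <;>
          · split_ifs with h1 h2 <;>
              first
              | (simp only [Bool.or_eq_true, beq_iff_eq]; omega)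
              | (exfalso; omega)
  · intro h
    split_ifs at h with h1 h2
    · rcases (by simpa using h : (j : Int) = (left : Int) - ((top : Int) - (i : Int)) ∨
          (j : Int) = (right : Int) + ((top : Int) - (i : Int))) with he | he
      · refine ⟨(i, (left : Int) - ((top : Int) - (i : Int))), ?_, rfl, hi, by dsimp only; omega, by dsimp only; omega, by dsimp only; omega⟩
        refine List.mem_append.2 (Or.inl ?_)
        simp only [List.mem_flatMap, List.mem_range, List.mem_cons]
        exact ⟨i, by omega, Or.inl rfl⟩
      · refine ⟨(i, (right : Int) + ((top : Int) - (i : Int))), ?_, rfl, hi, by dsimp only; omega, by dsimp only; omega, by dsimp only; omega⟩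
        refine List.mem_append.2 (Or.inl ?_)
        simp only [List.mem_flatMap, List.mem_range, List.mem_cons]
        exact ⟨i, by omega, Or.inr (Or.inl rfl)⟩
    · rcases (by simpa using h : (j : Int) = (left : Int) - ((i : Int) - (bottom : Int)) ∨
          (j : Int) = (right : Int) + ((i : Int) - (bottom : Int))) with he | he
      · refine ⟨(i, (left : Int) - ((i : Int) - (bottom : Int))), ?_, rfl, hi, by dsimp only; omega, by dsimp only; omega, by dsimp only; omega⟩
        refine List.mem_append.2 (Or.inr ?_)
        simp only [List.mem_flatMap, List.mem_range', List.mem_cons]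
        exact ⟨i, ⟨i - (bottom + 1), by omega, by omega⟩, Or.inl rfl⟩
      · refine ⟨(i, (right : Int) + ((i : Int) - (bottom : Int))), ?_, rfl, hi, by dsimp only; omega, by dsimp only; omega, by dsimp only; omega⟩
        refine List.mem_append.2 (Or.inr ?_)
        simp only [List.mem_flatMap, List.mem_range', List.mem_cons]
        exact ⟨i, ⟨i - (bottom + 1), by omega, by omega⟩, Or.inr (Or.inl rfl)⟩

theorem pv_getLast_cons_map (f : Nat → Int) (a : Nat) (l : List Nat) :
    (f a :: l.map f).getLast (List.cons_ne_nil _ _)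
      = f ((a :: l).getLast (List.cons_ne_nil _ _)) := by
  have h1 : (f a :: l.map f).getLast? = some ((f a :: l.map f).getLast (List.cons_ne_nil _ _)) :=
    List.getLast?_eq_some_getLast _
  have h2 : ((a :: l).map f).getLast? = some (f ((a :: l).getLast (List.cons_ne_nil _ _))) := by
    rw [List.getLast?_map, List.getLast?_eq_some_getLast (List.cons_ne_nil _ _)]; rfl
  rw [List.map_cons] at h2
  exact Option.some_injective _ (h1.symm.trans h2)

theorem pv_fill_eq (g : List (List Int)) (t v : Int) (hv : v ≠ 0) (n m : Nat)
    (hg : pvRect g n m) : pvFillA g t v = pvFillB g t v := by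
  obtain ⟨hlen, hrow⟩ := hg
  by_cases hgnil : g = []
  · subst hgnil; rfl
  · have hm : (g.getD 0 []).length = m := by
      cases g with
      | nil => exact absurd rfl hgnil
      | cons r0 gs => exact hrow r0 List.mem_cons_self
    simp only [pvFillA, pvFillB, hm]
    rw [pv_find?_eq_head?_filter, pv_find?_reverse_eq_getLast?_filter, pv_rows_eq]
    cases hFR : (List.range g.length).filter (fun k => (g.getD k []).contains t) with
    | nil => rfl
    | cons k0 ks =>
      have hk0 : k0 ∈ (List.range g.length).filter (fun k => (g.getD k []).contains t) := by
        rw [hFR]; exact List.mem_cons_self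
      have hkbmem : (k0 :: ks).getLast (List.cons_ne_nil _ _)
          ∈ (List.range g.length).filter (fun k => (g.getD k []).contains t) := by
        rw [hFR]; exact List.getLast_mem _
      set kb := (k0 :: ks).getLast (List.cons_ne_nil _ _) with hkb
      have hk0n : k0 < g.length := List.mem_range.1 (List.mem_filter.1 hk0).1
      have hkbn : kb < g.length := List.mem_range.1 (List.mem_filter.1 hkbmem).1
      have htb : k0 ≤ kb := by
        have hpw : ((List.range g.length).filter
            (fun k => (g.getD k []).contains t)).Pairwise (· < ·) :=
          List.Pairwise.filter _ List.pairwise_lt_range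
        rw [hFR] at hpw
        rcases List.mem_cons.1 (hFR ▸ hkbmem) with h | h
        · omega
        · have := (List.pairwise_cons.1 hpw).1 _ h; omega
      rw [List.head?_cons, List.getLast?_eq_some_getLast (l := k0 :: ks) (List.cons_ne_nil _ _)]
      simp only [List.map_cons]
      have hga : g.getD k0 [] = g[k0]'hk0n := by
        rw [List.getD_eq_getElem?_getD (l := g), List.getElem?_eq_getElem hk0n]; rfl
      have hrl : (g.getD k0 []).length = m := by
        rw [hga]; exact hrow _ (List.getElem_mem hk0n)
      simp only [PySem.List.pyGetD_natCast]
      rw [pv_cols_eq, hrl, pv_find?_reverse_eq_getLast?_filter, pv_find?_eq_head?_filter]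
      cases hFC : (List.range m).filter (fun k => (g.getD k0 []).getD k 0 == t) with
      | nil => rfl
      | cons c0 cs =>
        rw [List.head?_cons, List.getLast?_eq_some_getLast (l := c0 :: cs) (List.cons_ne_nil _ _)]
        simp only [List.map_cons]
        set cb := (c0 :: cs).getLast (List.cons_ne_nil _ _) with hcb
        rw [pv_getLast_cons_map, pv_getLast_cons_map, ← hkb, ← hcb]
        rw [pv_foldl_pair, pv_foldl_pair, ← List.foldl_append]
        apply pv_grid_ext (n := g.length) (m := m)
            (pv_rect_foldl v _ _ ⟨rfl, hrow⟩) (pv_rect_mapB ⟨rfl, hrow⟩ _ _ _ _ _)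
        intro i j hi hj
        rw [pv_cell_foldl hv _ _ ⟨rfl, hrow⟩ i j, pv_cell_mapB ⟨rfl, hrow⟩ _ _ _ _ v i j hi hj]
        rw [if_congr (and_congr_left' (pv_hit_iff g.length m k0 kb c0 cb i j hkbn htb hi hj)) rfl rfl]
        by_cases hz : pvCell g i j = 0 <;>
          by_cases hr : pvOnRay (k0 : Int) (kb : Int) (c0 : Int) (cb : Int) (i : Int) (j : Int) = true <;>
            simp [hz, hr]

theorem pv_rect_fillB {g : List (List Int)} {n m : Nat} (hg : pvRect g n m)
    (t v : Int) : pvRect (pvFillB g t v) n m := by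
  unfold pvFillB
  simp only
  split
  · exact hg
  · split
    · exact hg
    · exact pv_rect_mapB hg _ _ _ _ _

theorem pv_fillA_id (g : List (List Int)) (t v : Int)
    (h : ∀ row ∈ g, ¬ t ∈ row) : pvFillA g t v = g := by
  unfold pvFillA
  simp only
  have hf : (List.range g.length).find? (fun i => (g.getD i []).contains t) = none := by
    rw [List.find?_eq_none]
    intro i hi
    rw [List.mem_range] at hi
    have hgi : g.getD i [] = g[i]'hi := by
      rw [List.getD_eq_getElem?_getD (l := g), List.getElem?_eq_getElem hi]; rfl
    rw [hgi]
    simpa using h _ (List.getElem_mem hi)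
  rw [hf]

theorem pv_fillB_id (g : List (List Int)) (t v : Int)
    (h : ∀ row ∈ g, ¬ t ∈ row) : pvFillB g t v = g := by
  unfold pvFillB
  simp only
  have hf : ((PySem.List.enumerate g).filter (fun p => p.2.contains t)) = [] := by
    rw [List.filter_eq_nil_iff]
    intro p hp
    rcases (PySem.List.mem_enumerate_iff _ _ _).1 hp with ⟨k, hk, rfl⟩
    simpa using h _ (List.getElem_mem hk)
  rw [hf]
  rfl

-- ===== VERDICT (by name: the statement is the Claim_ definition above) =====
theorem transform_spec : Claim_equal_transform := by
  intro grid _hd hpre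
  unfold Spec_transform
  obtain ⟨hne, hcase⟩ := hpre
  show transform grid = transform_alt grid
  unfold transform transform_alt
  simp only [List.foldl_cons, List.foldl_nil]
  rcases hcase with hno | hrect
  · have h2 : ∀ row ∈ grid, ¬(2 : Int) ∈ row := fun r hr => (hno r hr).1
    have h6 : ∀ row ∈ grid, ¬(6 : Int) ∈ row := fun r hr => (hno r hr).2.1
    have h8 : ∀ row ∈ grid, ¬(8 : Int) ∈ row := fun r hr => (hno r hr).2.2
    rw [pv_fillA_id _ _ _ h2, pv_fillA_id _ _ _ h6, pv_fillA_id _ _ _ h8,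
        pv_fillB_id _ _ _ h2, pv_fillB_id _ _ _ h6, pv_fillB_id _ _ _ h8]
  · have hg : pvRect grid grid.length (grid.headD []).length := ⟨rfl, hrect⟩
    rw [pv_fill_eq grid 2 4 (by norm_num) _ _ hg,
        pv_fill_eq _ 6 1 (by norm_num) _ _ (pv_rect_fillB hg 2 4),
        pv_fill_eq _ 8 3 (by norm_num) _ _ (pv_rect_fillB (pv_rect_fillB hg 2 4) 6 1)]
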